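-- pv_equiv track=rewrite | github.com/CrackleCreeper/codebender | Commands/Currency/Buy.py | find_price_by_itemID
-- ===== SOURCE A (Python) =====
-- fired = {
--     "Rare": [
--         {"name": "Deco1", "price": 20, "itemID": 'FD1'},
--         {"name": "Smokescreen", "price": 50, "itemID": 'FS1'},
--         {"name": "Komodo Rhino", "price": 40, "itemID": 'FP1'}
--     ],
--     "Epic": [
--         {"name": "Deco2", "price": 100, "itemID": 'FD2'},
--         {"name": "Floor Is Lava", "price": 250, "itemID": 'FS2'},
--         {"name": "Phoenix", "price": 200, "itemID": 'FP2'}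
--     ],
--     "Legendary": [
--         {"name": "Deco3", "price": 1000, "itemID": 'FD3'},
--         {"name": "Fireball", "price": 2000, "itemID": 'FS3'},
--         {"name": "Dragon", "price": 1800, "itemID": 'FP3'}
--     ]
-- }
--
-- waterd = {
--     "Rare": [
--         {"name": "Deco1", "price": 20, "itemID": 'WD1'},
--         {"name": "Liquid Mirror", "price": 50, "itemID": 'WS1'},
--         {"name": "Dolphin Piranha", "price": 40, "itemID": 'WP1'}
--     ],
--     "Epic": [
--         {"name": "Deco2", "price": 100, "itemID": 'WD2'},
--         {"name": "Freeze", "price": 250, "itemID": 'WS2'},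
--         {"name": "Tiger Shark", "price": 200, "itemID": 'WP2'}
--     ],
--     "Legendary": [
--         {"name": "Deco3", "price": 1000, "itemID": 'WD3'},
--         {"name": "Holy Water", "price": 2000, "itemID": 'WS3'},
--         {"name": "Kraken", "price": 1800, "itemID": 'WP3'}
--     ]
-- }
--
-- aird = {
--     "Rare": [
--         {"name": "Deco1", "price": 20, "itemID": 'AD1'},
--         {"name": "Aircutter", "price": 50, "itemID": 'AS1'},
--         {"name": "Ring -Tailed Winged Lemur", "price": 40, "itemID": 'AP1'}
--     ],
--     "Epic": [
--         {"name": "Deco2", "price": 100, "itemID": 'AD2'},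
--         {"name": "Gale Strike", "price": 250, "itemID": 'AS2'},
--         {"name": "Spider Bat", "price": 200, "itemID": 'AP2'}
--     ],
--     "Legendary": [
--         {"name": "Deco3", "price": 1000, "itemID": 'AD3'},
--         {"name": "Whirlwind", "price": 2000, "itemID": 'AS3'},
--         {"name": "Flying Bison", "price": 1800, "itemID": 'AP3'}
--     ]
-- }
--
-- earthd = {
--     "Rare": [
--         {"name": "Deco1", "price": 20, "itemID": 'ED1'},
--         {"name": "Photosynthesis", "price": 50, "itemID": 'ES1'},
--         {"name": "Eel Sand Shark", "price": 40, "itemID": 'EP1'}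
--     ],
--     "Epic": [
--         {"name": "Deco2", "price": 100, "itemID": 'ED2'},
--         {"name": "Earthquake", "price": 250, "itemID": 'ES2'},
--         {"name": "Spider Snake", "price": 200, "itemID": 'EP2'}
--     ],
--     "Legendary": [
--         {"name": "Deco3", "price": 1000, "itemID": 'ED3'},
--         {"name": "Earthen Wall", "price": 2000, "itemID": 'ES3'},
--         {"name": "Shirshu", "price": 1800, "itemID": 'EP3'}
--     ]
-- }
--
-- def find_price_by_itemID(itemID):
--     shop_data = {
--         'fire': fired,
--         'water': waterd,
--         'air': aird,
--         'earth': earthd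
--     }
--
--     for element, data in shop_data.items():
--         for tier, items in data.items():
--             for item in items:
--                 if item['itemID'] == itemID:
--                     return item['price']
--
--     return None
-- ===== SOURCE B (Python) =====
-- # Shop IDs encode the item: element letter (F/W/A/E), kind letter (D/S/P), tier digit
-- # (1/2/3), and prices depend only on kind and tier, so decode instead of scanning.
-- _PRICES = {"D": (20, 100, 1000), "S": (50, 250, 2000), "P": (40, 200, 1800)}
--
-- def find_price_by_itemID(itemID):
--     if len(itemID) != 3:
--         return None
--     e, kind, tier = itemID
--     triple = _PRICES.get(kind)
--     if triple is None or e not in "FWAE":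
--         return None
--     if tier == "1":
--         return triple[0]
--     if tier == "2":
--         return triple[1]
--     if tier == "3":
--         return triple[2]
--     return None
-- ===== Notes on version B (the rewrite author's own statement) =====
-- stated objective: alternative
-- what changed: A's triple nested scan over elements, tiers and items is replaced by decoding the itemID itself (element letter F/W/A/E, kind letter D/S/P, tier digit 1/2/3) against the fixed kind-by-tier price table, since prices in the shop data depend only on kind and tier.
import Mathlib
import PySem

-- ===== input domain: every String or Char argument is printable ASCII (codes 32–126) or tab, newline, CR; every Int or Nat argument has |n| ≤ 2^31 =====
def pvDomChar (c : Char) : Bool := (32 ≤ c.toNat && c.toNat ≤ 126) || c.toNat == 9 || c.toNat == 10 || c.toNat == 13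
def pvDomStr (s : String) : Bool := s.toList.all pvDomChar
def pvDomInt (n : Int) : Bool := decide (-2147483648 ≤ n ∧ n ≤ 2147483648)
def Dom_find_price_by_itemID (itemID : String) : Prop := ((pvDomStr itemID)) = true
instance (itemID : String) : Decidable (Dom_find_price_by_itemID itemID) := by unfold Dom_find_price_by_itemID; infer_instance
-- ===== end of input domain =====

-- B decodes the itemID (element letter F/W/A/E, kind letter D/S/P, tier digit 1/2/3)
-- against the fixed pricing table instead of scanning every element/tier/item; objective: alternative.

-- ===== PORT A =====
-- An item is (name, price, itemID); A reads item['price'] and item['itemID'].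
def pvItem := String × Int × String

def pvFired : PySem.Dict String (List pvItem) := PySem.Dict.mk [
  ("Rare", [("Deco1", 20, "FD1"), ("Smokescreen", 50, "FS1"), ("Komodo Rhino", 40, "FP1")]),
  ("Epic", [("Deco2", 100, "FD2"), ("Floor Is Lava", 250, "FS2"), ("Phoenix", 200, "FP2")]),
  ("Legendary", [("Deco3", 1000, "FD3"), ("Fireball", 2000, "FS3"), ("Dragon", 1800, "FP3")])]

def pvWaterd : PySem.Dict String (List pvItem) := PySem.Dict.mk [
  ("Rare", [("Deco1", 20, "WD1"), ("Liquid Mirror", 50, "WS1"), ("Dolphin Piranha", 40, "WP1")]),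
  ("Epic", [("Deco2", 100, "WD2"), ("Freeze", 250, "WS2"), ("Tiger Shark", 200, "WP2")]),
  ("Legendary", [("Deco3", 1000, "WD3"), ("Holy Water", 2000, "WS3"), ("Kraken", 1800, "WP3")])]

def pvAird : PySem.Dict String (List pvItem) := PySem.Dict.mk [
  ("Rare", [("Deco1", 20, "AD1"), ("Aircutter", 50, "AS1"), ("Ring -Tailed Winged Lemur", 40, "AP1")]),
  ("Epic", [("Deco2", 100, "AD2"), ("Gale Strike", 250, "AS2"), ("Spider Bat", 200, "AP2")]),
  ("Legendary", [("Deco3", 1000, "AD3"), ("Whirlwind", 2000, "AS3"), ("Flying Bison", 1800, "AP3")])]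

def pvEarthd : PySem.Dict String (List pvItem) := PySem.Dict.mk [
  ("Rare", [("Deco1", 20, "ED1"), ("Photosynthesis", 50, "ES1"), ("Eel Sand Shark", 40, "EP1")]),
  ("Epic", [("Deco2", 100, "ED2"), ("Earthquake", 250, "ES2"), ("Spider Snake", 200, "EP2")]),
  ("Legendary", [("Deco3", 1000, "ED3"), ("Earthen Wall", 2000, "ES3"), ("Shirshu", 1800, "EP3")])]

-- inner loop: `for item in items: if item['itemID'] == itemID: return item['price']`
def pvScanItems (itemID : String) : List pvItem → Option Int
  | [] => none
  | it :: rest => if it.2.2 == itemID then some it.2.1 else pvScanItems itemID rest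

-- middle loop: `for tier, items in data.items(): …`
def pvScanTiers (itemID : String) : List (String × List pvItem) → Option Int
  | [] => none
  | (_, items) :: rest =>
      match pvScanItems itemID items with
      | some p => some p
      | none => pvScanTiers itemID rest

-- outer loop: `for element, data in shop_data.items(): …`
def pvScanElems (itemID : String) : List (String × PySem.Dict String (List pvItem)) → Option Int
  | [] => none
  | (_, data) :: rest =>
      match pvScanTiers itemID data.items with
      | some p => some p
      | none => pvScanElems itemID rest

def find_price_by_itemID (itemID : String) : Option Int :=
  let shop_data : PySem.Dict String (PySem.Dict String (List pvItem)) :=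
    PySem.Dict.mk [("fire", pvFired), ("water", pvWaterd), ("air", pvAird), ("earth", pvEarthd)]
  pvScanElems itemID shop_data.items

-- ===== PORT B =====
-- _PRICES = {"D": (20, 100, 1000), "S": (50, 250, 2000), "P": (40, 200, 1800)}
def pvPrices : PySem.Dict Char (Int × Int × Int) :=
  PySem.Dict.mk [('D', (20, 100, 1000)), ('S', (50, 250, 2000)), ('P', (40, 200, 1800))]

-- if len(itemID) != 3: return None; e, kind, tier = itemID; triple = _PRICES.get(kind);
-- if triple is None or e not in "FWAE": return None; pick triple[0|1|2] by the tier digit.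
def find_price_by_itemID_alt (itemID : String) : Option Int :=
  match itemID.toList with
  | [e, kind, tier] =>
      match pvPrices.get? kind with
      | none => none
      | some triple =>
          if e ∈ "FWAE".toList then
            if tier == '1' then some triple.1
            else if tier == '2' then some triple.2.1
            else if tier == '3' then some triple.2.2
            else none
          else none
  | _ => none

-- ===== PRECONDITION & SPEC =====
def Spec_find_price_by_itemID (itemID : String) (out : Option Int) : Prop := out = find_price_by_itemID_alt itemID
instance (itemID : String) (out : Option Int) : Decidable (Spec_find_price_by_itemID itemID out) := by unfold Spec_find_price_by_itemID; infer_instance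

-- ===== CLAIM (what is proved, stated in full; the proofs are below) =====
def Claim_equal_find_price_by_itemID : Prop := ∀ (itemID : String), Dom_find_price_by_itemID itemID → Spec_find_price_by_itemID itemID (find_price_by_itemID itemID)

-- ===== LEMMAS AND PROOFS =====

def pvIds : List String :=
  ["FD1", "FS1", "FP1", "FD2", "FS2", "FP2", "FD3", "FS3", "FP3",
   "WD1", "WS1", "WP1", "WD2", "WS2", "WP2", "WD3", "WS3", "WP3",
   "AD1", "AS1", "AP1", "AD2", "AS2", "AP2", "AD3", "AS3", "AP3",
   "ED1", "ES1", "EP1", "ED2", "ES2", "EP2", "ED3", "ES3", "EP3"]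

-- A returns none off the 36 shop ids: each comparison in the scan fails.
theorem pvA_none (s : String) (h : s ∉ pvIds) : find_price_by_itemID s = none := by
  simp only [pvIds, List.mem_cons, List.not_mem_nil, or_false, not_or] at h
  obtain ⟨h1, h2, h3, h4, h5, h6, h7, h8, h9, h10, h11, h12, h13, h14, h15, h16, h17, h18,
    h19, h20, h21, h22, h23, h24, h25, h26, h27, h28, h29, h30, h31, h32, h33, h34, h35, h36⟩ := h
  simp [find_price_by_itemID, pvScanElems, pvScanTiers, pvScanItems,
        pvFired, pvWaterd, pvAird, pvEarthd,
        Ne.symm h1, Ne.symm h2, Ne.symm h3, Ne.symm h4, Ne.symm h5, Ne.symm h6,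
        Ne.symm h7, Ne.symm h8, Ne.symm h9, Ne.symm h10, Ne.symm h11, Ne.symm h12,
        Ne.symm h13, Ne.symm h14, Ne.symm h15, Ne.symm h16, Ne.symm h17, Ne.symm h18,
        Ne.symm h19, Ne.symm h20, Ne.symm h21, Ne.symm h22, Ne.symm h23, Ne.symm h24,
        Ne.symm h25, Ne.symm h26, Ne.symm h27, Ne.symm h28, Ne.symm h29, Ne.symm h30,
        Ne.symm h31, Ne.symm h32, Ne.symm h33, Ne.symm h34, Ne.symm h35, Ne.symm h36]

-- B returns a value only on the 36 shop ids.
theorem pvB_some_mem (s : String) (p : Int) (h : find_price_by_itemID_alt s = some p) :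
    s ∈ pvIds := by
  unfold find_price_by_itemID_alt at h
  have hs : s = String.ofList s.toList := by simp
  rcases hcs : s.toList with _ | ⟨e, _ | ⟨k, _ | ⟨t, _ | ⟨d, rest⟩⟩⟩⟩ <;>
    rw [hcs] at h <;> try simp at h
  rw [hcs] at hs
  rcases hk : pvPrices.get? k with _ | triple <;> rw [hk] at h
  · simp at h
  · have hkmem : k = 'D' ∨ k = 'S' ∨ k = 'P' := by
      by_contra hc
      push Not at hc
      obtain ⟨hd, hsS, hp⟩ := hc
      simp [pvPrices, PySem.Dict.get?, Ne.symm hd, Ne.symm hsS, Ne.symm hp] at hk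
    split_ifs at h with he h1 h2 h3 <;> try simp at h
    all_goals {
      first
        | (have ht : t = '1' := by simpa using h1)
        | (have ht : t = '2' := by simpa using h2)
        | (have ht : t = '3' := by simpa using h3)
      subst hs ht
      rcases hkmem with rfl | rfl | rfl <;> rcases he with rfl | rfl | rfl | rfl <;> decide
    }

theorem pvB_none (s : String) (h : s ∉ pvIds) : find_price_by_itemID_alt s = none := by
  rcases hb : find_price_by_itemID_alt s with _ | p
  · rfl
  · exact absurd (pvB_some_mem s p hb) h

-- ===== VERDICT (by name: the statement is the Claim_ definition above) =====
set_option maxRecDepth 8192 in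
theorem find_price_by_itemID_spec : Claim_equal_find_price_by_itemID := by
  intro s _
  unfold Spec_find_price_by_itemID
  by_cases h : s ∈ pvIds
  · simp only [pvIds, List.mem_cons, List.not_mem_nil, or_false] at h
    rcases h with rfl|rfl|rfl|rfl|rfl|rfl|rfl|rfl|rfl|rfl|rfl|rfl|rfl|rfl|rfl|rfl|rfl|rfl|rfl|rfl|rfl|rfl|rfl|rfl|rfl|rfl|rfl|rfl|rfl|rfl|rfl|rfl|rfl|rfl|rfl|rfl <;> decide
  · rw [pvA_none s h, pvB_none s h]
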